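-- pv_equiv track=rewrite | github.com/abnsol/Competitive-Programming | A2SV G6 - Round #1 07-Feb-2025/E - From S To T 249504.py | helper
-- ===== SOURCE A (Python) =====
-- from collections import Counter
--
-- def helper(s,t,p):
--     dicp = Counter(p)
--     i = j = 0
--     while j < len(t):
--         if i < len(s) and s[i] == t[j]:
--             i += 1
--             j += 1
--         else:
--             if i < len(s) and s[i] not in t:
--                 return "NO"
--             elif t[j] in dicp and dicp[t[j]] > 0:
--                 dicp[t[j]] -= 1
--                 j += 1
--             else:
--                 return "NO"
--     if i < len(s):
--         return "NO"
--
--     return "YES"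
-- ===== SOURCE B (Python) =====
-- from collections import Counter
--
-- def helper(s, t, p):
--     # 1) s must be a subsequence of t
--     i = 0
--     for ch in t:
--         if i < len(s) and s[i] == ch:
--             i += 1
--     if i < len(s):
--         return "NO"
--     # 2) the characters of t not coming from s must be available in p
--     cs, ct, cp = Counter(s), Counter(t), Counter(p)
--     for ch in ct:
--         if ct[ch] - cs[ch] > cp[ch]:
--             return "NO"
--     return "YES"
-- ===== Notes on version B (the rewrite author's own statement) =====
-- stated objective: simpler
-- what changed: A's single interleaved greedy loop that live-decrements a Counter of p and tests 's[i] not in t' mid-scan is replaced by two independent passes: a plain subsequence two-pointer check of s against t, then one batched comparison of Counter(t)-Counter(s) against Counter(p).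
import Mathlib
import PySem

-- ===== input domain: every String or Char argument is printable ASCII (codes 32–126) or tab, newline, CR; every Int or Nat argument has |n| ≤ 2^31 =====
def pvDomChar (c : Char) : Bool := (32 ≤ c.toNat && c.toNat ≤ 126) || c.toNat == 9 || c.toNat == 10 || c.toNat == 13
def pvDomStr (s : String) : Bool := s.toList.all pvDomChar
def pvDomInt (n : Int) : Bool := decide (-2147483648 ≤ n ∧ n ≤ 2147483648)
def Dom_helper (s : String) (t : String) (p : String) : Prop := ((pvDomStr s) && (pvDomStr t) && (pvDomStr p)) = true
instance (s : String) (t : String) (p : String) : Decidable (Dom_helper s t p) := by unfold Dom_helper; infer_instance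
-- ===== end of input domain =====

-- B replaces A's interleaved greedy-with-live-Counter simulation by a plain subsequence
-- check followed by one batched multiset comparison Counter(t)-Counter(s) vs Counter(p):
-- simpler, two independent passes, no mutable counter during the scan.

-- ===== PORT A =====
-- the while loop of A: state (i, j, dicp) ported as (suffix of s at i, suffix of t at j, dicp);
-- tl is the full t, needed for the 's[i] not in t' test
def helperLoop (tl : List Char) : List Char → List Char → PySem.Dict Char Int → String
  | srem, [], _ => if 0 < srem.length then "NO" else "YES"
  | a :: srem, b :: trem, d =>
    if a = b then helperLoop tl srem trem d
    else if PySem.Chars.isIn [a] tl = false then "NO"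
    else if d.contains b && decide (0 < d.getD b 0) then
      helperLoop tl (a :: srem) trem (d.insert b (d.getD b 0 - 1))
    else "NO"
  | [], b :: trem, d =>
    if d.contains b && decide (0 < d.getD b 0) then
      helperLoop tl [] trem (d.insert b (d.getD b 0 - 1))
    else "NO"
  termination_by _ t _ => t.length

def helper (s : String) (t : String) (p : String) : String :=
  helperLoop t.toList s.toList t.toList (PySem.Dict.counter p.toList)

-- ===== PORT B =====
def helper_alt (s : String) (t : String) (p : String) : String :=
  let sl := s.toList
  let i := t.toList.foldl (fun i ch => if i < sl.length ∧ sl[i]? = some ch then i + 1 else i) 0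
  if i < sl.length then "NO"
  else
    let cs := PySem.Dict.counter sl
    let ct := PySem.Dict.counter t.toList
    let cp := PySem.Dict.counter p.toList
    if ct.keys.any (fun ch => decide (cp.getD ch 0 < ct.getD ch 0 - cs.getD ch 0)) then "NO"
    else "YES"

-- ===== PRECONDITION & SPEC =====
def Spec_helper (s : String) (t : String) (p : String) (out : String) : Prop := out = helper_alt s t p
instance (s : String) (t : String) (p : String) (out : String) : Decidable (Spec_helper s t p out) := by unfold Spec_helper; infer_instance

-- ===== CLAIM (what is proved, stated in full; the proofs are below) =====
def Claim_equal_helper : Prop := ∀ (s : String) (t : String) (p : String), Dom_helper s t p → Spec_helper s t p (helper s t p)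

-- ===== LEMMAS AND PROOFS =====

-- greedy residual: what is left of s after greedily matching it into t
def gre : List Char → List Char → List Char
  | s, [] => s
  | [], _ :: _ => []
  | a :: s, b :: t => if a = b then gre s t else gre (a :: s) t

-- number of occurrences of c among the characters of t NOT matched by the greedy run
def umc : List Char → List Char → Char → Nat
  | _, [], _ => 0
  | [], b :: t, c => (if b = c then 1 else 0) + umc [] t c
  | a :: s, b :: t, c => if a = b then umc s t c else (if b = c then 1 else 0) + umc (a :: s) t c

lemma gre_nil : ∀ (t : List Char), gre [] t = [] := by
  intro t; cases t <;> rfl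

lemma gre_not_mem {a : Char} : ∀ (t : List Char) (s : List Char), a ∉ t → gre (a :: s) t = a :: s := by
  intro t
  induction t with
  | nil => intro s _; rfl
  | cons b tr ih =>
    intro s h
    have hab : a ≠ b := fun hh => h (hh ▸ List.mem_cons_self ..)
    simp only [gre, if_neg hab]
    exact ih s (fun hm => h (List.mem_cons_of_mem _ hm))

lemma umc_not_mem {c : Char} : ∀ (t : List Char) (s : List Char), c ∉ t → umc s t c = 0 := by
  intro t
  induction t with
  | nil => intro s _; cases s <;> rfl
  | cons b tr ih =>
    intro s h
    have hbc : b ≠ c := fun hh => h (hh ▸ List.mem_cons_self ..)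
    have htr : c ∉ tr := fun hm => h (List.mem_cons_of_mem _ hm)
    cases s with
    | nil => simp only [umc, if_neg hbc, ih [] htr]
    | cons a sr =>
      by_cases hab : a = b
      · subst hab; simp only [umc]
        exact ih sr htr
      · simp only [umc, if_neg hab, if_neg hbc, ih _ htr]

lemma umc_count : ∀ (t s : List Char) (c : Char),
    umc s t c + s.count c = t.count c + (gre s t).count c := by
  intro t
  induction t with
  | nil => intro s c; cases s <;> simp [umc, gre]
  | cons b tr ih =>
    intro s c
    cases s with
    | nil =>
      have := ih [] c
      simp only [gre_nil, gre, umc, List.count_cons, List.count_nil] at *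
      by_cases hbc : b = c <;> simp [hbc] at * <;> omega
    | cons a sr =>
      by_cases hab : a = b
      · subst hab
        simp only [umc, gre]
        have := ih sr c
        simp only [List.count_cons] at *
        by_cases hac : a = c <;> simp [hac] at * <;> omega
      · simp only [umc, gre, if_neg hab]
        have := ih (a :: sr) c
        simp only [List.count_cons] at *
        by_cases hbc : b = c <;> simp [hbc] at * <;> omega

lemma contains_of_getD_pos (d : PySem.Dict Char Int) (b : Char) (h : 0 < d.getD b 0) :
    d.contains b = true := by
  by_contra hc
  have hnone : d.get? b = none := by
    cases hg : d.get? b with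
    | none => rfl
    | some v =>
      exfalso; apply hc
      simp only [PySem.Dict.get?, Option.map_eq_some_iff] at hg
      obtain ⟨pr, hfind, _⟩ := hg
      simp only [PySem.Dict.contains, List.any_eq_true]
      have hp := List.find?_some hfind
      have hm := List.mem_of_find?_eq_some hfind
      exact ⟨pr, hm, hp⟩
  simp [PySem.Dict.getD, hnone] at h

-- the two if-conditions around a p-consumption step agree
lemma cond_insert_iff (tr : List Char) (b : Char) (d : PySem.Dict Char Int) (f : Char → Nat)
    (hdb : 0 < d.getD b 0) (hf0 : b ∉ tr → f b = 0) :
    ((∀ c ∈ tr, (f c : Int) ≤ (d.insert b (d.getD b 0 - 1)).getD c 0) ↔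
      (∀ c ∈ b :: tr, ((if b = c then (1:Int) else 0) + f c) ≤ d.getD c 0)) := by
  constructor
  · intro h c hc
    by_cases hcb : c = b
    · subst hcb
      rw [if_pos rfl]
      by_cases hctr : c ∈ tr
      · have := h c hctr
        rw [PySem.Dict.getD_insert, if_pos rfl] at this
        omega
      · rw [hf0 hctr]; omega
    · have hctr : c ∈ tr := by
        rcases List.mem_cons.mp hc with h1 | h1
        · exact absurd h1 hcb
        · exact h1
      have := h c hctr
      rw [PySem.Dict.getD_insert, if_neg hcb] at this
      rw [if_neg (fun hh => hcb hh.symm)]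
      omega
  · intro h c hc
    rw [PySem.Dict.getD_insert]
    by_cases hcb : c = b
    · subst hcb
      have := h c (List.mem_cons_self ..)
      rw [if_pos rfl] at this
      rw [if_pos rfl]
      omega
    · have := h c (List.mem_cons_of_mem _ hc)
      rw [if_neg (fun hh => hcb hh.symm)] at this
      rw [if_neg hcb]
      omega

lemma cond_skip_iff (tr : List Char) (b : Char) (d : PySem.Dict Char Int) (f : Char → Nat)
    (hd : ∀ c, 0 ≤ d.getD c 0) (hf0 : b ∉ tr → f b = 0) :
    ((∀ c ∈ tr, (f c : Int) ≤ d.getD c 0) ↔ (∀ c ∈ b :: tr, (f c : Int) ≤ d.getD c 0)) := by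
  constructor
  · intro h c hc
    rcases List.mem_cons.mp hc with h1 | h1
    · subst h1
      by_cases hctr : c ∈ tr
      · exact h c hctr
      · rw [hf0 hctr]; exact_mod_cast hd c
    · exact h c h1
  · intro h c hc
    exact h c (List.mem_cons_of_mem _ hc)

-- the p-consumption step of A's loop, shared by the two srem shapes
lemma loopA_dbranch (tl tr : List Char) (b : Char) (srem : List Char) (d : PySem.Dict Char Int)
    (hd : ∀ c, 0 ≤ d.getD c 0)
    (hgre : gre srem (b :: tr) = gre srem tr)
    (humc : ∀ c, umc srem (b :: tr) c = (if b = c then 1 else 0) + umc srem tr c)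
    (hrec : ∀ d' : PySem.Dict Char Int, (∀ c, 0 ≤ d'.getD c 0) →
      helperLoop tl srem tr d' =
        if gre srem tr = [] ∧ ∀ c ∈ tr, (umc srem tr c : Int) ≤ d'.getD c 0 then "YES" else "NO") :
    (if d.contains b && decide (0 < d.getD b 0) then
        helperLoop tl srem tr (d.insert b (d.getD b 0 - 1))
      else "NO")
    = if gre srem (b :: tr) = [] ∧ ∀ c ∈ b :: tr, (umc srem (b :: tr) c : Int) ≤ d.getD c 0
      then "YES" else "NO" := by
  have hcast : ∀ c, ((umc srem (b :: tr) c : Nat) : Int) =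
      (if b = c then (1:Int) else 0) + (umc srem tr c : Int) := by
    intro c; rw [humc]; by_cases hbc : b = c <;> simp [hbc]
  by_cases hdb : 0 < d.getD b 0
  · rw [if_pos (by simp [contains_of_getD_pos d b hdb, hdb])]
    have hd' : ∀ c, 0 ≤ (d.insert b (d.getD b 0 - 1)).getD c 0 := by
      intro c; rw [PySem.Dict.getD_insert]
      split_ifs
      · omega
      · exact hd c
    rw [hrec _ hd']
    refine if_congr ?_ rfl rfl
    rw [hgre]
    refine and_congr_right fun _ => ?_
    have hiff := cond_insert_iff tr b d (fun c => umc srem tr c) hdb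
      (fun hb => umc_not_mem tr srem hb)
    simp only [hcast]
    exact hiff
  · have hdb0 : d.getD b 0 = 0 := le_antisymm (by omega) (hd b)
    rw [if_neg (by simp [hdb0])]
    rw [if_neg]
    rintro ⟨-, hall⟩
    have h1 := hall b (List.mem_cons_self ..)
    rw [hcast, if_pos rfl, hdb0] at h1
    omega

-- characterization of A's loop
lemma loopA_eq (tl : List Char) : ∀ (trem srem : List Char) (d : PySem.Dict Char Int),
    (∀ c ∈ trem, c ∈ tl) → (∀ c, 0 ≤ d.getD c 0) →
    helperLoop tl srem trem d =
      if gre srem trem = [] ∧ ∀ c ∈ trem, (umc srem trem c : Int) ≤ d.getD c 0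
      then "YES" else "NO" := by
  intro trem
  induction trem with
  | nil =>
    intro srem d _ _
    cases srem with
    | nil => simp [helperLoop, gre, umc]
    | cons a sr => simp [helperLoop, gre]
  | cons b tr ih =>
    intro srem d hsub hd
    have hbtl : b ∈ tl := hsub b (List.mem_cons_self ..)
    have hsub' : ∀ c ∈ tr, c ∈ tl := fun c hc => hsub c (List.mem_cons_of_mem _ hc)
    cases srem with
    | nil =>
      simp only [helperLoop]
      exact loopA_dbranch tl tr b [] d hd (by rw [gre_nil, gre_nil]) (fun c => rfl)
        (fun d' hd' => ih [] d' hsub' hd')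
    | cons a sr =>
      simp only [helperLoop]
      by_cases hab : a = b
      · subst hab
        rw [if_pos rfl, ih sr d hsub' hd]
        refine if_congr ?_ rfl rfl
        have : gre (a :: sr) (a :: tr) = gre sr tr := by simp [gre]
        rw [this]
        refine and_congr_right fun _ => ?_
        have humc : ∀ c, umc (a :: sr) (a :: tr) c = umc sr tr c := by
          intro c; simp [umc]
        simp only [humc]
        exact cond_skip_iff tr a d (fun c => umc sr tr c) hd
          (fun ha => umc_not_mem tr sr ha)
      · rw [if_neg hab]
        by_cases hatl : a ∈ tl
        · have hisin : PySem.Chars.isIn [a] tl = true := by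
            rw [PySem.Chars.isIn_iff_infix]
            exact (List.singleton_infix_iff a tl).mpr hatl
          rw [if_neg (by simp [hisin])]
          exact loopA_dbranch tl tr b (a :: sr) d hd
            (by simp [gre, hab]) (fun c => by simp [umc, hab])
            (fun d' hd' => ih (a :: sr) d' hsub' hd')
        · have hisin : PySem.Chars.isIn [a] tl = false := by
            rw [PySem.Chars.isIn_eq_false_iff]
            exact fun hinf => hatl ((List.singleton_infix_iff a tl).mp hinf)
          rw [if_pos hisin]
          rw [if_neg]
          rintro ⟨hgre, -⟩
          have hanbt : a ∉ b :: tr := fun hm => hatl (hsub a hm)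
          rw [gre_not_mem (b :: tr) sr hanbt] at hgre
          exact List.cons_ne_nil a sr hgre

lemma helper_eq (s t p : String) :
    helper s t p =
      if gre s.toList t.toList = [] ∧
         ∀ c ∈ t.toList, (umc s.toList t.toList c : Int) ≤ (p.toList.count c : Int)
      then "YES" else "NO" := by
  unfold helper
  rw [loopA_eq t.toList t.toList s.toList (PySem.Dict.counter p.toList)
      (fun c hc => hc)
      (fun c => by rw [PySem.Dict.getD_counter]; exact Int.natCast_nonneg _)]
  refine if_congr (and_congr_right fun _ => ?_) rfl rfl
  refine forall_congr' fun c => imp_congr_right fun _ => ?_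
  rw [PySem.Dict.getD_counter]

lemma foldl_drop (sl : List Char) : ∀ (t : List Char) (i : Nat), i ≤ sl.length →
    (t.foldl (fun i ch => if i < sl.length ∧ sl[i]? = some ch then i + 1 else i) i) ≤ sl.length ∧
    sl.drop (t.foldl (fun i ch => if i < sl.length ∧ sl[i]? = some ch then i + 1 else i) i) =
      gre (sl.drop i) t := by
  intro t
  induction t with
  | nil => intro i h; exact ⟨h, rfl⟩
  | cons ch tr ih =>
    intro i hi
    simp only [List.foldl_cons]
    by_cases hcond : i < sl.length ∧ sl[i]? = some ch
    · rw [if_pos hcond]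
      obtain ⟨hlt, hget⟩ := hcond
      have hch : sl[i] = ch := by
        have := List.getElem?_eq_getElem hlt
        rw [hget] at this
        exact (Option.some_inj.mp this.symm)
      obtain ⟨h1, h2⟩ := ih (i + 1) hlt
      refine ⟨h1, ?_⟩
      rw [h2, List.drop_eq_getElem_cons hlt, hch]
      simp [gre]
    · rw [if_neg hcond]
      obtain ⟨h1, h2⟩ := ih i hi
      refine ⟨h1, h2.trans ?_⟩
      rcases Nat.lt_or_ge i sl.length with hlt | hge
      · have hne : sl[i] ≠ ch := fun he => hcond ⟨hlt, by rw [List.getElem?_eq_getElem hlt, he]⟩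
        rw [List.drop_eq_getElem_cons hlt]
        simp [gre, hne]
      · rw [List.drop_eq_nil_of_le hge, gre_nil, gre_nil]

lemma helper_alt_eq (s t p : String) :
    helper_alt s t p =
      if gre s.toList t.toList = [] ∧
         ∀ c ∈ t.toList, (t.toList.count c : Int) - (s.toList.count c : Int) ≤ (p.toList.count c : Int)
      then "YES" else "NO" := by
  obtain ⟨hle, hdrop⟩ := foldl_drop s.toList t.toList 0 (Nat.zero_le _)
  rw [List.drop_zero] at hdrop
  unfold helper_alt
  dsimp only
  by_cases h1 : (t.toList.foldl
      (fun i ch => if i < s.toList.length ∧ s.toList[i]? = some ch then i + 1 else i) 0) < s.toList.length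
  · rw [if_pos h1, if_neg]
    rintro ⟨hg, -⟩
    rw [← hdrop] at hg
    have := List.drop_eq_nil_iff.mp hg
    omega
  · rw [if_neg h1]
    have hg : gre s.toList t.toList = [] := by
      rw [← hdrop]
      exact List.drop_eq_nil_of_le (by omega)
    by_cases h2 : ∀ c ∈ t.toList, (t.toList.count c : Int) - (s.toList.count c : Int) ≤ (p.toList.count c : Int)
    · have hnot : ¬ ((PySem.Dict.counter t.toList).keys.any fun ch =>
          decide ((PySem.Dict.counter p.toList).getD ch 0 <
            (PySem.Dict.counter t.toList).getD ch 0 - (PySem.Dict.counter s.toList).getD ch 0)) = true := by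
        intro hany
        rw [List.any_eq_true] at hany
        obtain ⟨ch, hmem, hdec⟩ := hany
        rw [PySem.Dict.keys_counter, PySem.Set.mem_ofList] at hmem
        simp only [PySem.Dict.getD_counter, decide_eq_true_eq] at hdec
        have := h2 ch hmem
        omega
      rw [if_neg hnot, if_pos ⟨hg, h2⟩]
    · have hany : ((PySem.Dict.counter t.toList).keys.any fun ch =>
          decide ((PySem.Dict.counter p.toList).getD ch 0 <
            (PySem.Dict.counter t.toList).getD ch 0 - (PySem.Dict.counter s.toList).getD ch 0)) = true := by
        have h2' := h2
        push Not at h2'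
        obtain ⟨ch, hmem, hlt⟩ := h2'
        rw [List.any_eq_true]
        refine ⟨ch, ?_, ?_⟩
        · rw [PySem.Dict.keys_counter, PySem.Set.mem_ofList]; exact hmem
        · simp only [PySem.Dict.getD_counter, decide_eq_true_eq]
          omega
      rw [if_pos hany, if_neg (fun hc => h2 hc.2)]

-- ===== VERDICT (by name: the statement is the Claim_ definition above) =====
theorem helper_spec : Claim_equal_helper := by
  intro s t p _
  unfold Spec_helper
  rw [helper_eq, helper_alt_eq]
  by_cases hg : gre s.toList t.toList = []
  · refine if_congr (and_congr_right fun _ => forall_congr' fun c => imp_congr_right fun _ => ?_) rfl rfl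
    have hc := umc_count t.toList s.toList c
    rw [hg, List.count_nil] at hc
    omega
  · rw [if_neg (fun h => hg h.1), if_neg (fun h => hg h.1)]
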